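-- pv_equiv track=rewrite | github.com/jmiba/ai-service-chatbot | app2.py | render_with_citations_by_index
-- ===== SOURCE A (Python) =====
-- def render_with_citations_by_index(text_html, citation_map, placements):
--     """
--     Insert citations at the specified character indices.
--     """
--     s = text_html or ""
--     n = len(s)
--
--     # Sort placements in reverse order to avoid index shifting
--     for idx, num in sorted(placements, key=lambda x: x[0], reverse=True):
--         note = citation_map.get(num)
--         if not note:
--             continue
--
--         # Use clean citation markers that preserve markdown
--         citation = f" [{num}]"
--         i = max(0, min(n, idx))
--         s = s[:i] + citation + s[i:]
--
--     return s
-- ===== SOURCE B (Python) =====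
-- def render_with_citations_by_index(text_html, citation_map, placements):
--     s = text_html or ""
--     n = len(s)
--     # Ascending index order with equal indices reversed: exactly the left-to-right
--     # order in which A's back-to-front splices leave the markers in the result.
--     asc = list(reversed(sorted(placements, key=lambda x: x[0], reverse=True)))
--     marks = [(min(n, max(0, idx)), num) for idx, num in asc if citation_map.get(num)]
--     pieces = []
--     pos = 0
--     for i, num in marks:
--         pieces.append(s[pos:i] + " [" + str(num) + "]")
--         pos = i
--     pieces.append(s[pos:])
--     return "".join(pieces)
-- ===== Notes on version B (the rewrite author's own statement) =====
-- stated objective: alternative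
-- what changed: Instead of splicing the whole string once per placement in descending order, B precomputes the kept clamped placements in ascending order (ties reversed), then makes one forward pass collecting text-segment+marker pieces with a running position and a single join.
import Mathlib
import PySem

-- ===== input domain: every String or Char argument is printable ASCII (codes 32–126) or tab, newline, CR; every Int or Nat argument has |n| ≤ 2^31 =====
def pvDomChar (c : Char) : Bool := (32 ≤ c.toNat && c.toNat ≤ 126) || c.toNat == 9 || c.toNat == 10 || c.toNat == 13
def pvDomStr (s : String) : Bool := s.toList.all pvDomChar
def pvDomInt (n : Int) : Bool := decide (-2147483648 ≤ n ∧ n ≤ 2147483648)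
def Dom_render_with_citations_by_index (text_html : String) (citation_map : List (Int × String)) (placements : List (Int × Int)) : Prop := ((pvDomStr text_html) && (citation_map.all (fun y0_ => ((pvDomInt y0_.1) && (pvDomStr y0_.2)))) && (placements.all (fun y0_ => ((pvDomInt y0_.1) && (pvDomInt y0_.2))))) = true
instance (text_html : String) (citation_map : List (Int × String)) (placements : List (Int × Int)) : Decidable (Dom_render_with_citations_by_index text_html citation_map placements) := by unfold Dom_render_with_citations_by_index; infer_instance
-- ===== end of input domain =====

-- B replaces A's repeated whole-string splice per placement by one forward pass:
-- it takes the placements in ascending clamped order (ties reversed, matching A's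
-- back-to-front insertion), collects text-segment + marker pieces and joins once.

-- ===== PORT A =====
-- the citation marker f" [{num}]" as a char list
def pvCit (num : Int) : List Char := ' ' :: '[' :: (PySem.Int.toChars num ++ [']'])
-- 'note = citation_map.get(num); if not note: …' (note is falsy iff missing or "")
def pvNoteOk (d : PySem.Dict Int String) (num : Int) : Bool :=
  match d.get? num with
  | some note => note != ""
  | none => false
-- i = max(0, min(n, idx))
def pvClamp (n idx : Int) : Int := max 0 (min n idx)

-- A's loop body: s = s[:i] + citation + s[i:]
def pvStepA (d : PySem.Dict Int String) (n : Int) (s : List Char) (p : Int × Int) : List Char :=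
  if pvNoteOk d p.2 then
    PySem.List.slice s none (some (pvClamp n p.1)) ++ pvCit p.2
      ++ PySem.List.slice s (some (pvClamp n p.1)) none
  else s

def render_with_citations_by_index (text_html : String) (citation_map : List (Int × String)) (placements : List (Int × Int)) : String :=
  -- 's = text_html or ""': on str this is the identity (if text_html is "" the result is "" again) — exact
  let s := text_html.toList
  let n : Int := s.length
  let d := PySem.Dict.ofList citation_map
  String.ofList ((PySem.List.sorted placements (fun x => x.1) true).foldl (pvStepA d n) s)

-- ===== PORT B =====
-- " [" + str(num) + "]"
def pvMarker (num : Int) : List Char := (' ' :: '[' :: PySem.Int.toChars num) ++ [']']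
-- 'if citation_map.get(num)': truthy iff present and non-empty
def pvKeep (d : PySem.Dict Int String) (num : Int) : Bool := PySem.Dict.getD d num "" != ""
-- min(n, max(0, idx))
def pvClampB (n idx : Int) : Int := min n (max 0 idx)

def render_with_citations_by_index_alt (text_html : String) (citation_map : List (Int × String)) (placements : List (Int × Int)) : String :=
  -- 's = text_html or ""': identity on str — exact
  let s := text_html.toList
  let n : Int := s.length
  let d := PySem.Dict.ofList citation_map
  -- asc = list(reversed(sorted(placements, key=..., reverse=True)))
  let asc := (PySem.List.sorted placements (fun x => x.1) true).reverse
  -- marks = [(min(n, max(0, idx)), num) for idx, num in asc if citation_map.get(num)]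
  let marks := (asc.filter (fun p => pvKeep d p.2)).map (fun p => (pvClampB n p.1, p.2))
  -- pieces/pos loop: pieces.append(s[pos:i] + marker); pos = i
  let st := marks.foldl (fun (acc : List (List Char) × Int) m =>
      (acc.1 ++ [PySem.List.slice s (some acc.2) (some m.1) ++ pvMarker m.2], m.1)) ([], 0)
  -- pieces.append(s[pos:]); return "".join(pieces)
  String.ofList (PySem.Chars.join [] (st.1 ++ [PySem.List.slice s (some st.2) none]))

-- ===== PRECONDITION & SPEC =====
def Spec_render_with_citations_by_index (text_html : String) (citation_map : List (Int × String)) (placements : List (Int × Int)) (out : String) : Prop := out = render_with_citations_by_index_alt text_html citation_map placements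
instance (text_html : String) (citation_map : List (Int × String)) (placements : List (Int × Int)) (out : String) : Decidable (Spec_render_with_citations_by_index text_html citation_map placements out) := by unfold Spec_render_with_citations_by_index; infer_instance

-- ===== CLAIM (what is proved, stated in full; the proofs are below) =====
def Claim_equal_render_with_citations_by_index : Prop := ∀ (text_html : String) (citation_map : List (Int × String)) (placements : List (Int × Int)), Dom_render_with_citations_by_index text_html citation_map placements → Spec_render_with_citations_by_index text_html citation_map placements (render_with_citations_by_index text_html citation_map placements)

-- ===== LEMMAS AND PROOFS =====

-- proof-only helpers
def pvIns (t : List Char) (m : Int × Int) : List Char :=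
  t.take m.1.toNat ++ (pvMarker m.2 ++ t.drop m.1.toNat)

def pvTender (s : List Char) : Int → List (Int × Int) → List Char
  | p, [] => s.drop p.toNat
  | p, m :: M => (s.take m.1.toNat).drop p.toNat ++ (pvMarker m.2 ++ pvTender s m.1 M)

lemma pvNoteOk_eq_keep (d : PySem.Dict Int String) (c : Int) : pvNoteOk d c = pvKeep d c := by
  unfold pvNoteOk pvKeep PySem.Dict.getD
  cases d.get? c <;> simp

lemma pvClamp_eq (n i : Int) (hn : 0 ≤ n) : pvClamp n i = pvClampB n i := by
  unfold pvClamp pvClampB; omega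

lemma pvCit_eq_marker (c : Int) : pvCit c = pvMarker c := by
  simp [pvCit, pvMarker]

lemma pvClampB_nonneg (n i : Int) (_hn : 0 ≤ n) : 0 ≤ pvClampB n i := by
  unfold pvClampB; omega

lemma pvClampB_le (n i : Int) (_hn : 0 ≤ n) : pvClampB n i ≤ n := by
  unfold pvClampB; omega

lemma pvClampB_mono (n a b : Int) (h : a ≤ b) : pvClampB n a ≤ pvClampB n b := by
  unfold pvClampB; omega

lemma pvSlice_eq (s : List Char) (a b : Int) (ha : 0 ≤ a) (hb : 0 ≤ b) :
    PySem.List.slice s (some a) (some b) = (s.take b.toNat).drop a.toNat := by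
  rw [PySem.List.slice_toNat s ha hb, List.drop_take]

lemma pvStepA_eq (d : PySem.Dict Int String) (n : Int) (hn : 0 ≤ n) (s : List Char) (p : Int × Int) :
    pvStepA d n s p = if pvKeep d p.2 then pvIns s (pvClampB n p.1, p.2) else s := by
  unfold pvStepA pvIns
  rw [pvNoteOk_eq_keep, pvClamp_eq _ _ hn,
      PySem.List.slice_to s (pvClampB_nonneg n p.1 hn),
      PySem.List.slice_from s (pvClampB_nonneg n p.1 hn), pvCit_eq_marker]
  split <;> simp

-- A's fold is the fold of pvIns over the kept, clamped placements
lemma pvA_filter (d : PySem.Dict Int String) (n : Int) (hn : 0 ≤ n) (L : List (Int × Int)) :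
    ∀ t : List Char, L.foldl (pvStepA d n) t =
      ((L.filter (fun p => pvKeep d p.2)).map (fun p => (pvClampB n p.1, p.2))).foldl pvIns t := by
  induction L with
  | nil => intro t; rfl
  | cons p L ih =>
      intro t
      simp only [List.foldl_cons, List.filter_cons]
      by_cases h : pvKeep d p.2
      · simp only [h, if_pos, List.map_cons, List.foldl_cons, pvStepA_eq d n hn]
        exact ih _
      · simp only [h, Bool.false_eq_true, if_neg, not_false_iff, pvStepA_eq d n hn]
        exact ih t

-- the back-to-front splices produce the forward rendering
lemma pv_core (s : List Char) (M : List (Int × Int))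
    (hM : M.Pairwise (fun a b => a.1 ≤ b.1))
    (hB : ∀ m ∈ M, 0 ≤ m.1 ∧ m.1 ≤ (s.length : Int)) :
    ∀ p : Int, 0 ≤ p → (∀ m ∈ M, p ≤ m.1) →
      M.foldr (fun m t => pvIns t m) s = s.take p.toNat ++ pvTender s p M := by
  induction M with
  | nil => intro p _ _; simp [pvTender]
  | cons m M ih =>
      intro p hp0 hple
      obtain ⟨hhead, htail⟩ := List.pairwise_cons.mp hM
      have hm := hB m List.mem_cons_self
      have hlen : (s.take m.1.toNat).length = m.1.toNat := by
        simp [List.length_take]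
        omega
      have hinner : M.foldr (fun m t => pvIns t m) s
          = s.take m.1.toNat ++ pvTender s m.1 M :=
        ih htail (fun q hq => hB q (List.mem_cons_of_mem m hq)) m.1 hm.1 hhead
      simp only [List.foldr_cons, hinner]
      unfold pvIns
      rw [List.take_append_of_le_length (le_of_eq hlen.symm),
          List.drop_append_of_le_length (le_of_eq hlen.symm)]
      have hpm : p.toNat ≤ m.1.toNat := Int.toNat_le_toNat (hple m List.mem_cons_self)
      have htt : (s.take m.1.toNat).take m.1.toNat = s.take m.1.toNat := by simp
      have hdd : (s.take m.1.toNat).drop m.1.toNat = ([] : List Char) := by simp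
      have hsplit : s.take p.toNat ++ (s.take m.1.toNat).drop p.toNat = s.take m.1.toNat := by
        have ht2 : (s.take m.1.toNat).take p.toNat = s.take p.toNat := by
          rw [List.take_take, Nat.min_eq_left hpm]
        rw [← ht2, List.take_append_drop]
      rw [htt, hdd]
      simp only [pvTender, List.nil_append]
      conv_rhs => rw [← List.append_assoc, hsplit]

-- "".join l ++ one more piece
lemma pvJoin_append (l : List (List Char)) (x : List Char) :
    PySem.Chars.join [] (l ++ [x]) = PySem.Chars.join [] l ++ x := by
  induction l with
  | nil => simp [PySem.Chars.join_singleton, PySem.Chars.join_nil]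
  | cons a t iht =>
      cases t with
      | nil => simp [PySem.Chars.join_cons_cons, PySem.Chars.join_singleton]
      | cons b u =>
          simp only [List.cons_append]
          rw [PySem.Chars.join_cons_cons]
          rw [show (b :: (u ++ [x])) = (b :: u) ++ [x] from by simp, iht,
              PySem.Chars.join_cons_cons]
          simp

-- "".join of the pieces the B loop accumulates is the forward rendering
lemma pv_emit (s : List Char) (M : List (Int × Int)) (hB : ∀ m ∈ M, 0 ≤ m.1) :
    ∀ (acc : List (List Char)) (p : Int), 0 ≤ p →
      PySem.Chars.join []
        (((M.foldl (fun (acc : List (List Char) × Int) m =>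
            (acc.1 ++ [PySem.List.slice s (some acc.2) (some m.1) ++ pvMarker m.2], m.1)) (acc, p)).1)
          ++ [PySem.List.slice s
            (some ((M.foldl (fun (acc : List (List Char) × Int) m =>
              (acc.1 ++ [PySem.List.slice s (some acc.2) (some m.1) ++ pvMarker m.2], m.1)) (acc, p)).2)) none])
      = (PySem.Chars.join [] acc) ++ pvTender s p M := by
  induction M with
  | nil =>
      intro acc p hp
      simp only [List.foldl_nil]
      rw [PySem.List.slice_from s hp, pvJoin_append]
      simp [pvTender]
  | cons m M ih =>
      intro acc p hp
      have hm := hB m List.mem_cons_self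
      simp only [List.foldl_cons]
      rw [ih (fun q hq => hB q (List.mem_cons_of_mem m hq)) _ m.1 hm]
      rw [pvJoin_append, pvSlice_eq s p m.1 hp hm]
      simp [pvTender]

-- ===== VERDICT (by name: the statement is the Claim_ definition above) =====
theorem render_with_citations_by_index_spec : Claim_equal_render_with_citations_by_index := by
  unfold Claim_equal_render_with_citations_by_index
  intro text_html citation_map placements _
  unfold Spec_render_with_citations_by_index
  unfold render_with_citations_by_index render_with_citations_by_index_alt
  dsimp only
  set s : List Char := text_html.toList with hs
  set d := PySem.Dict.ofList citation_map with hd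
  set D := PySem.List.sorted placements (fun x => x.1) true with hD
  set n : Int := (s.length : Int) with hn
  have hn0 : 0 ≤ n := by positivity
  set M := ((D.reverse.filter (fun p => pvKeep d p.2)).map (fun p => (pvClampB n p.1, p.2)))
    with hM
  -- A side: drop skipped placements, then turn the reversed fold into a foldr over M
  rw [pvA_filter d n hn0 D s]
  have hfr : D.filter (fun p => pvKeep d p.2)
      = (D.reverse.filter (fun p => pvKeep d p.2)).reverse := by
    rw [List.filter_reverse, List.reverse_reverse]
  rw [hfr, List.map_reverse, List.foldl_reverse]
  -- order and bounds of M
  have hDp : D.Pairwise (fun a b : Int × Int => b.1 ≤ a.1) :=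
    PySem.List.sorted_pairwise_rev placements (fun x => x.1)
  have hasc : D.reverse.Pairwise (fun a b : Int × Int => a.1 ≤ b.1) :=
    List.pairwise_reverse.mpr (by exact hDp.imp (fun h => h))
  have hMp : M.Pairwise (fun a b : Int × Int => a.1 ≤ b.1) := by
    rw [hM]
    exact List.pairwise_map.mpr ((hasc.filter _).imp (fun h => pvClampB_mono n _ _ h))
  have hMb : ∀ m ∈ M, 0 ≤ m.1 ∧ m.1 ≤ n := by
    intro m hm
    rw [hM] at hm
    obtain ⟨q, _, rfl⟩ := List.mem_map.mp hm
    exact ⟨pvClampB_nonneg n q.1 hn0, pvClampB_le n q.1 hn0⟩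
  rw [pv_core s M hMp hMb 0 le_rfl (fun m hm => (hMb m hm).1)]
  rw [pv_emit s M (fun m hm => (hMb m hm).1) [] 0 le_rfl]
  simp [PySem.Chars.join_nil]
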